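-- pv_equiv track=rewrite | github.com/JYKkkk/dailyAlgorithm | sharksharkec2/230523_ps_유사 칸토어 비트열.py | bit
-- ===== SOURCE A (Python) =====
-- dp = dict()
--
-- def bit(n, i):
--     if n == 0:
--         return 1
--
--     if n in dp:
--         if i in dp[n]:
--             return dp[n][i]
--     else:
--         dp[n] = dict()
--
--     idx = i//5
--     offset = i%5
--     prev = bit(n-1, idx)
--
--     if prev == 0 or offset == 2:
--         dp[n][i] = 0
--         return 0
--     else:
--         dp[n][i] = 1
--         return 1
-- ===== SOURCE B (Python) =====
-- def bit(n, i):
--     # Closed-form scan: the bit is 1 iff none of the n least-significant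
--     # base-5 digits of i equals 2.
--     return 1 if all(i // 5**k % 5 != 2 for k in range(n)) else 0
-- ===== Notes on version B (the rewrite author's own statement) =====
-- stated objective: simpler
-- what changed: B replaces the memoized recursion on n (which threads i through repeated //5) with a single generator expression testing each of the n least-significant base-5 digits of i directly via i // 5**k % 5.
import Mathlib
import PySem

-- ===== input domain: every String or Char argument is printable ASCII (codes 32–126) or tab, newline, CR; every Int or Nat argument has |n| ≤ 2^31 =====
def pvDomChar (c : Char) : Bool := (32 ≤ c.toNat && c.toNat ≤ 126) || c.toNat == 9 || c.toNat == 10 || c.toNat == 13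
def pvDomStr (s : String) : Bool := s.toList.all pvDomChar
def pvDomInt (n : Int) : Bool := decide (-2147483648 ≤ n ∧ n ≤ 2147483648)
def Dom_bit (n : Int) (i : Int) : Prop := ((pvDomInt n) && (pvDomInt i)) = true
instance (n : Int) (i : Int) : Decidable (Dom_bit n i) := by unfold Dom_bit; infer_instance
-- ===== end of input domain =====

-- ===== PORT A =====
-- B drops the memoized recursion and tests the n low base-5 digits of i directly (objective: simpler).
-- A's module-level memo dict only caches values and never changes them, so the port is the plain recursion.
def bitGo (k : Nat) (i : Int) : Int :=
  match k with
  | 0 => 1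
  | Nat.succ m =>
    let idx := PySem.Int.floordiv i 5
    let offset := PySem.Int.mod i 5
    let prev := bitGo m idx
    if prev = 0 ∨ offset = 2 then 0 else 1

def bit (n : Int) (i : Int) : Int :=
  if n = 0 then 1 else bitGo n.toNat i

-- ===== PORT B =====
-- Lazy port of Source B's `all(i // 5**k % 5 != 2 for k in range(n))`: the generator is
-- consumed left to right and `all` stops at the first False, hence the short-circuit `&&`.
def altScan (i : Int) (r : Nat) (k : Nat) : Bool :=
  match r with
  | 0 => true
  | Nat.succ r' =>
    (PySem.Int.mod (PySem.Int.floordiv i ((5 : Int) ^ k)) 5 != 2) && altScan i r' (k + 1)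

def bit_alt (n : Int) (i : Int) : Int :=
  if altScan i n.toNat 0 then 1 else 0

-- ===== PRECONDITION & SPEC =====
-- Pre_ excludes n < 0, on which A recurses without reaching the base case (RecursionError).
def Pre_bit (n : Int) (i : Int) : Prop := 0 ≤ n
instance (n : Int) (i : Int) : Decidable (Pre_bit n i) := by unfold Pre_bit; infer_instance
def pvWitness_bit : Int × Int := (3, 7)

def Spec_bit (n : Int) (i : Int) (out : Int) : Prop := out = bit_alt n i
instance (n : Int) (i : Int) (out : Int) : Decidable (Spec_bit n i out) := by unfold Spec_bit; infer_instance

-- ===== CLAIM (what is proved, stated in full; the proofs are below) =====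
def Claim_equal_bit : Prop := ∀ (n : Int) (i : Int), Dom_bit n i → Pre_bit n i → Spec_bit n i (bit n i)

-- ===== LEMMAS AND PROOFS =====
theorem floordiv_floordiv_pow (i : Int) (j : Nat) :
    PySem.Int.floordiv (PySem.Int.floordiv i 5) ((5 : Int) ^ j)
      = PySem.Int.floordiv i ((5 : Int) ^ (j + 1)) := by
  simp only [PySem.Int.floordiv]
  rw [Int.fdiv_fdiv_eq_fdiv_mul _ (by norm_num) (by positivity), pow_succ, mul_comm]

-- A's recursion computes the flat digit test.
theorem bitGo_eq_digits (k : Nat) (i : Int) :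
    bitGo k i =
      if ∀ j < k, PySem.Int.mod (PySem.Int.floordiv i ((5 : Int) ^ j)) 5 ≠ 2 then 1 else 0 := by
  induction k generalizing i with
  | zero => simp [bitGo]
  | succ m ih =>
    show (if bitGo m (PySem.Int.floordiv i 5) = 0 ∨ PySem.Int.mod i 5 = 2 then (0 : Int) else 1) = _
    rw [ih]
    by_cases h0 : PySem.Int.mod i 5 = 2
    · rw [if_pos (Or.inr h0), if_neg]
      intro hall
      exact hall 0 (Nat.succ_pos m) (by simpa using h0)
    · by_cases hall : ∀ j < m, PySem.Int.mod (PySem.Int.floordiv (PySem.Int.floordiv i 5) ((5 : Int) ^ j)) 5 ≠ 2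
      · rw [if_pos hall, if_neg (not_or.mpr ⟨one_ne_zero, h0⟩), if_pos]
        intro j hj
        match j with
        | 0 => simpa using h0
        | Nat.succ t =>
          rw [← floordiv_floordiv_pow]
          exact hall t (Nat.lt_of_succ_lt_succ hj)
      · rw [if_neg hall, if_pos (Or.inl rfl), if_neg]
        intro hAll
        apply hall
        intro j hj
        rw [floordiv_floordiv_pow]
        exact hAll (j + 1) (Nat.succ_lt_succ hj)

theorem altScan_iff (i : Int) (r : Nat) (k : Nat) :
    altScan i r k = true ↔ ∀ j < r, PySem.Int.mod (PySem.Int.floordiv i ((5 : Int) ^ (k + j))) 5 ≠ 2 := by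
  induction r generalizing k with
  | zero => simp [altScan]
  | succ r' ih =>
    simp only [altScan, Bool.and_eq_true, bne_iff_ne, ne_eq, ih]
    constructor
    · rintro ⟨h0, hrest⟩ j hj
      match j with
      | 0 => simpa using h0
      | Nat.succ t =>
        have := hrest t (Nat.lt_of_succ_lt_succ hj)
        rwa [show k + 1 + t = k + (t + 1) by omega] at this
    · intro h
      refine ⟨by simpa using h 0 (Nat.succ_pos r'), fun t ht => ?_⟩
      have := h (t + 1) (Nat.succ_lt_succ ht)
      rwa [show k + (t + 1) = k + 1 + t by omega] at this

theorem bit_alt_eq_digits (n : Int) (i : Int) :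
    bit_alt n i =
      if ∀ j < n.toNat, PySem.Int.mod (PySem.Int.floordiv i ((5 : Int) ^ j)) 5 ≠ 2 then 1 else 0 := by
  unfold bit_alt
  have h := altScan_iff i n.toNat 0
  simp only [Nat.zero_add] at h
  by_cases hc : ∀ j < n.toNat, PySem.Int.mod (PySem.Int.floordiv i ((5 : Int) ^ j)) 5 ≠ 2
  · rw [if_pos (h.mpr hc), if_pos hc]
  · rw [if_neg (fun ht => hc (h.mp ht)), if_neg hc]

-- ===== VERDICT (by name: the statement is the Claim_ definition above) =====
theorem bit_spec : Claim_equal_bit := by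
  intro n i _ hn
  unfold Spec_bit
  rw [bit_alt_eq_digits n i]
  unfold bit
  split
  · next h => subst h; simp
  · exact bitGo_eq_digits _ _
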